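-- pv_equiv track=rewrite | github.com/rajeshmr82/AdventOfCode | 2023/20/puzzle.py | process_flip_flops
-- ===== SOURCE A (Python) =====
-- def process_flip_flops(graph, flip_flops):
--     results = []
--
--     for flip_flop in flip_flops:
--         state = 0  # Initialize an integer to represent the state
--         connected = flip_flop
--
--         while True:
--             module_type, destinations = graph.get(connected, (None, []))
--
--             # Early exit if there are no destinations
--             if not destinations:
--                 break
--
--             # Update the state based on the conditions
--             if len(destinations) == 2 or destinations[0] not in flip_flops:
--                 state |= 1
--             else:
--                 state &= ~1
--
--             # Find all flip-flops in the destinations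
--             flip_flops_in_destinations = [dest for dest in destinations if dest in flip_flops]
--
--             # get the next flip-flop or None
--             connected = next((dest for dest in flip_flops_in_destinations), None)
--             if connected is None:
--                 break  # Exit the loop if there are no flip-flops
--
--         results.append(state)  # Append the final state as an integer
--
--     return results
-- ===== SOURCE B (Python) =====
-- def process_flip_flops(graph, flip_flops):
--     # Memoized walk over the deterministic flip-flop successor graph: each node's
--     # final state equals its chain terminal's bit, so values are cached and shared.
--     # The walk is bounded by len(flip_flops)+1 steps (pigeonhole bound on an
--     # acyclic chain); on a cyclic chain, where the original never terminates,
--     # it stops with 0.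
--     ffset = set(flip_flops)
--     memo = {}
--     results = []
--     for f in flip_flops:
--         path = []
--         x = f
--         for _ in range(len(flip_flops) + 1):
--             if x in memo:
--                 val = memo[x]
--                 break
--             ds = graph.get(x, (None, []))[1]
--             if not ds:
--                 val = 0
--                 path.append(x)
--                 break
--             nxt = next((d for d in ds if d in ffset), None)
--             if nxt is None or not graph.get(nxt, (None, []))[1]:
--                 val = 1 if len(ds) == 2 or ds[0] not in ffset else 0
--                 path.append(x)
--                 break
--             path.append(x)
--             x = nxt
--         else:
--             val = 0  # cyclic chain: unreachable when the original terminates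
--         for p in path:
--             memo[p] = val
--         results.append(val)
--     return results
-- ===== Notes on version B (the rewrite author's own statement) =====
-- stated objective: alternative
-- what changed: A re-walks the whole flip-flop successor chain (carrying a state bit) separately for every start; B does one memoized walk over the deterministic successor graph, caching each chain's terminal bit for every node on the path so shared chain suffixes are traversed only once.
import Mathlib
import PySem

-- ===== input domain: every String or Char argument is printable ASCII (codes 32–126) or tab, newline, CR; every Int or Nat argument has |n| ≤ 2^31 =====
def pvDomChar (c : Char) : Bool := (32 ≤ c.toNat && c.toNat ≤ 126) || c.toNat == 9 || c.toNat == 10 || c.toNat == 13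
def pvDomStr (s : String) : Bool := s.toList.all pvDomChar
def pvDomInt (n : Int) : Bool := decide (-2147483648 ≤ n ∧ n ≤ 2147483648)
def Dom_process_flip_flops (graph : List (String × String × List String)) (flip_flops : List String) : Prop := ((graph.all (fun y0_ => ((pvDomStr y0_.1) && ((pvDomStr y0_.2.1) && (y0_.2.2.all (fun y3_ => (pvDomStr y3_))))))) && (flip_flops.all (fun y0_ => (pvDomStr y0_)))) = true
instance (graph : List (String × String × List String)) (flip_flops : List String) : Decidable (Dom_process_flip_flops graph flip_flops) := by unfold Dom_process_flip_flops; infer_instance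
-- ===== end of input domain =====

-- B replaces A's per-start chain re-walk (carrying a state bit) by one memoized
-- walk over the successor graph, caching the terminal bit per node (objective:
-- alternative; it trades per-node memo bookkeeping for not re-walking shared chains).

-- ===== PORT A =====
-- graph.get(connected, (None, []))[1] : dict lookup (first match) taking the destinations
def pvDests (graph : List (String × String × List String)) (x : String) : List String :=
  match (PySem.Dict.mk graph).get? x with
  | some (_, ds) => ds
  | none => []

-- A's 'while True' loop carrying the integer state ('state |= 1' = Int.lor,
-- 'state &= ~1' = Int.land with Int.lnot); the fuel only bounds the iterations —
-- under Pre_ the loop always breaks before it runs out.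
def pvLoopA (graph : List (String × String × List String)) (flip_flops : List String) :
    Nat → Int → String → Int
  | 0, state, _ => state
  | fuel+1, state, connected =>
    let ds := pvDests graph connected
    if ds = [] then state
    else
      let state' : Int :=
        if ds.length = 2 || !flip_flops.contains (ds.head?.getD "") then Int.lor state 1
        else Int.land state (Int.lnot 1)
      match (ds.filter (fun d => flip_flops.contains d)).head? with
      | none => state'
      | some n => pvLoopA graph flip_flops fuel state' n

def process_flip_flops (graph : List (String × String × List String)) (flip_flops : List String) : List Int :=
  flip_flops.foldl
    (fun results f => results ++ [pvLoopA graph flip_flops (flip_flops.length + 1) 0 f]) []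

-- ===== PORT B =====
-- the state bit contributed by a node with nonempty destinations
def pvBit (graph : List (String × String × List String)) (flip_flops : List String) (x : String) : Int :=
  let ds := pvDests graph x
  if ds.length = 2 || !flip_flops.contains (ds.head?.getD "") then 1 else 0

-- B's inner while loop: walk the chain until a memoized node or a terminal,
-- collecting the visited nodes; returns (value, nodes to memoize).
def pvWalkB (graph : List (String × String × List String)) (flip_flops : List String) :
    Nat → PySem.Dict String Int → List String → String → (Int × List String)
  | 0, _, path, _ => (0, path)
  | fuel+1, memo, path, x =>
    match memo.get? x with
    | some v => (v, path)
    | none =>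
      let ds := pvDests graph x
      if ds = [] then (0, x :: path)
      else
        match ds.find? (fun d => flip_flops.contains d) with
        | none => (pvBit graph flip_flops x, x :: path)
        | some n =>
          if pvDests graph n = [] then (pvBit graph flip_flops x, x :: path)
          else pvWalkB graph flip_flops fuel memo (x :: path) n

def process_flip_flops_alt (graph : List (String × String × List String)) (flip_flops : List String) : List Int :=
  (flip_flops.foldl
    (fun (st : PySem.Dict String Int × List Int) f =>
      let r := pvWalkB graph flip_flops (flip_flops.length + 1) st.1 [] f
      (r.2.foldl (fun m p => m.insert p r.1) st.1, st.2 ++ [r.1]))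
    (PySem.Dict.empty, [])).2

-- ===== PRECONDITION & SPEC =====
-- the chain of flip-flop successors out of x reaches a sink within the given
-- number of steps (pvTerm iterates only the successor MAP of the graph, it does
-- not replay A's computation: no state is carried)
def pvTerm (graph : List (String × String × List String)) (flip_flops : List String) :
    Nat → String → Bool
  | 0, _ => false
  | fuel+1, x =>
    let ds := pvDests graph x
    if ds = [] then true
    else match (ds.filter (fun d => flip_flops.contains d)).head? with
      | none => true
      | some n => pvTerm graph flip_flops fuel n

-- Pre_ = the functional graph of flip-flop successors is acyclic below every
-- start node: each chain reaches a sink within |flip_flops|+1 steps (by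
-- pigeonhole, since every successor lies in flip_flops, this bound is exactly
-- acyclicity). It excludes ONLY inputs on which A's 'while True' loop DIVERGES,
-- i.e. A never returns a value there.
def Pre_process_flip_flops (graph : List (String × String × List String)) (flip_flops : List String) : Prop :=
  ∀ f ∈ flip_flops, pvTerm graph flip_flops (flip_flops.length + 1) f = true
instance (graph : List (String × String × List String)) (flip_flops : List String) : Decidable (Pre_process_flip_flops graph flip_flops) := by unfold Pre_process_flip_flops; infer_instance

def pvWitness_process_flip_flops : (List (String × String × List String)) × List String :=
  ([("a", ("%", ["b"])), ("b", ("%", ["c"])), ("c", ("&", []))], ["a", "b"])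

def Spec_process_flip_flops (graph : List (String × String × List String)) (flip_flops : List String) (out : List Int) : Prop := out = process_flip_flops_alt graph flip_flops
instance (graph : List (String × String × List String)) (flip_flops : List String) (out : List Int) : Decidable (Spec_process_flip_flops graph flip_flops out) := by unfold Spec_process_flip_flops; infer_instance

-- ===== CLAIM (what is proved, stated in full; the proofs are below) =====
def Claim_equal_process_flip_flops : Prop := ∀ (graph : List (String × String × List String)) (flip_flops : List String), Dom_process_flip_flops graph flip_flops → Pre_process_flip_flops graph flip_flops → Spec_process_flip_flops graph flip_flops (process_flip_flops graph flip_flops)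

-- ===== LEMMAS AND PROOFS =====

theorem pvWitness_ok :
    Dom_process_flip_flops pvWitness_process_flip_flops.1 pvWitness_process_flip_flops.2 ∧
    Pre_process_flip_flops pvWitness_process_flip_flops.1 pvWitness_process_flip_flops.2 := by
  constructor <;> decide

-- the two bit operations on a state that is 0 or 1
theorem pvLor_eq (s : Int) (hs : s = 0 ∨ s = 1) : Int.lor s 1 = 1 := by
  rcases hs with rfl | rfl <;> decide

theorem pvLand_eq (s : Int) (hs : s = 0 ∨ s = 1) : Int.land s (Int.lnot 1) = 0 := by
  rcases hs with rfl | rfl <;>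
    · show Int.land _ (Int.negSucc 1) = 0
      simp [Int.land, Nat.ldiff, Nat.bitwise]

-- fuel-irrelevance of A's loop once termination within k iterations is known
theorem pvLoopA_fuel (graph : List (String × String × List String)) (ff : List String) :
    ∀ k x, pvTerm graph ff k x = true → ∀ m, k ≤ m → ∀ s,
      pvLoopA graph ff m s x = pvLoopA graph ff k s x := by
  intro k
  induction k with
  | zero => intro x h; simp [pvTerm] at h
  | succ k ih =>
    intro x h m hm s
    obtain ⟨m', rfl⟩ : ∃ m', m = m' + 1 := ⟨m - 1, by omega⟩
    simp only [pvTerm] at h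
    simp only [pvLoopA]
    by_cases hds : pvDests graph x = []
    · simp [hds]
    · simp only [if_neg hds] at h ⊢
      cases hfind : ((pvDests graph x).filter (fun d => ff.contains d)).head? with
      | none => simp
      | some n =>
        simp only [hfind] at h ⊢
        exact ih n h m' (by omega) _

-- the state is overwritten on every iteration, so any state in {0,1} gives the
-- same result as state 0 once the node has destinations
theorem pvLoopA_state (graph : List (String × String × List String)) (ff : List String)
    (x : String) (s : Int) (hs : s = 0 ∨ s = 1) (hds : pvDests graph x ≠ []) (f : Nat) :
    pvLoopA graph ff (f+1) s x = pvLoopA graph ff (f+1) 0 x := by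
  simp only [pvLoopA, if_neg hds, pvLor_eq s hs, pvLand_eq s hs,
    pvLor_eq 0 (Or.inl rfl), pvLand_eq 0 (Or.inl rfl)]

-- abbreviation used only in the proofs: A's per-start value with full fuel
def pvAval (graph : List (String × String × List String)) (ff : List String) (x : String) : Int :=
  pvLoopA graph ff (ff.length + 1) 0 x

-- one unfolding of A's loop from state 0, phrased through pvBit
theorem pvBit_eq (graph : List (String × String × List String)) (ff : List String)
    (x : String) (hds : pvDests graph x ≠ []) (f : Nat) :
    pvLoopA graph ff (f+1) 0 x =
      (match ((pvDests graph x).filter (fun d => ff.contains d)).head? with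
       | none => pvBit graph ff x
       | some n => pvLoopA graph ff f (pvBit graph ff x) n) := by
  simp only [pvLoopA, if_neg hds, pvBit, pvLor_eq 0 (Or.inl rfl), pvLand_eq 0 (Or.inl rfl)]

theorem pvBit_range (graph : List (String × String × List String)) (ff : List String)
    (x : String) : pvBit graph ff x = 0 ∨ pvBit graph ff x = 1 := by
  unfold pvBit
  dsimp only
  split <;> simp

-- find? is head?-of-filter
theorem pvFind?_eq_head?_filter (l : List String) (p : String → Bool) :
    l.find? p = (l.filter p).head? := by
  induction l with
  | nil => rfl
  | cons a l ih =>
    cases h : p a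
    · simp only [List.find?_cons, List.filter_cons, h, Bool.false_eq_true, if_false]; exact ih
    · simp only [List.find?_cons, List.filter_cons, h, if_true, List.head?_cons]

theorem pvNext_mem (ff : List String) (l : List String) (n : String)
    (h : (l.filter (fun d => ff.contains d)).head? = some n) : n ∈ ff := by
  have h' : l.find? (fun d => ff.contains d) = some n := by
    rw [pvFind?_eq_head?_filter]; exact h
  have := List.find?_some h'
  simpa using this

-- the chain value is inherited along a continuing step
theorem pvAval_step (graph : List (String × String × List String)) (ff : List String)
    (x n : String) (hds : pvDests graph x ≠ [])
    (hn : ((pvDests graph x).filter (fun d => ff.contains d)).head? = some n)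
    (hdn : pvDests graph n ≠ []) (k : Nat)
    (ht : pvTerm graph ff (k+1) x = true) (hk : k + 1 ≤ ff.length + 1) :
    pvAval graph ff x = pvAval graph ff n := by
  have hnff : n ∈ ff := pvNext_mem ff _ n hn
  have hlen : 1 ≤ ff.length := List.length_pos_of_mem hnff
  have htn : pvTerm graph ff k n = true := by
    simp only [pvTerm, if_neg hds, hn] at ht
    exact ht
  obtain ⟨m, hm⟩ : ∃ m, ff.length = m + 1 := ⟨ff.length - 1, by omega⟩
  calc pvAval graph ff x
      = pvLoopA graph ff ff.length (pvBit graph ff x) n := by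
        unfold pvAval; rw [pvBit_eq graph ff x hds ff.length, hn]
    _ = pvLoopA graph ff ff.length 0 n := by
        rw [hm]; exact pvLoopA_state graph ff n _ (pvBit_range graph ff x) hdn m
    _ = pvLoopA graph ff k 0 n := pvLoopA_fuel graph ff k n htn ff.length (by omega) 0
    _ = pvAval graph ff n := (pvLoopA_fuel graph ff k n htn (ff.length + 1) (by omega) 0).symm

-- terminal step: the value is the bit of the last node with destinations
theorem pvAval_term (graph : List (String × String × List String)) (ff : List String)
    (x : String) (hds : pvDests graph x ≠ [])
    (hstop : ((pvDests graph x).filter (fun d => ff.contains d)).head? = none ∨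
      ∃ n, ((pvDests graph x).filter (fun d => ff.contains d)).head? = some n ∧
        pvDests graph n = []) :
    pvAval graph ff x = pvBit graph ff x := by
  unfold pvAval
  rw [pvBit_eq graph ff x hds ff.length]
  rcases hstop with h | ⟨n, hn, hdn⟩
  · rw [h]
  · rw [hn]
    have hnff : n ∈ ff := pvNext_mem ff _ n hn
    obtain ⟨m, hm⟩ : ∃ m, ff.length = m + 1 :=
      ⟨ff.length - 1, by have := List.length_pos_of_mem hnff; omega⟩
    rw [hm]
    simp [pvLoopA, hdn]

-- the memo invariant: every stored value is A's per-start value for its key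
def pvInv (graph : List (String × String × List String)) (ff : List String)
    (memo : PySem.Dict String Int) : Prop :=
  ∀ k v, memo.get? k = some v → v = pvAval graph ff k

theorem pvWalkB_correct (graph : List (String × String × List String)) (ff : List String) :
    ∀ fuel memo path x, pvInv graph ff memo → pvTerm graph ff fuel x = true →
      fuel ≤ ff.length + 1 →
      (pvWalkB graph ff fuel memo path x).1 = pvAval graph ff x ∧
      (∀ p ∈ (pvWalkB graph ff fuel memo path x).2,
        p ∈ path ∨ pvAval graph ff p = pvAval graph ff x) := by
  intro fuel
  induction fuel with
  | zero => intro memo path x _ ht _; simp [pvTerm] at ht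
  | succ fuel ih =>
    intro memo path x hinv ht hfuel
    simp only [pvWalkB]
    cases hget : memo.get? x with
    | some v =>
      refine ⟨hinv x v hget, fun p hp => Or.inl hp⟩
    | none =>
      by_cases hds : pvDests graph x = []
      · refine ⟨?_, ?_⟩
        · simp only [if_pos hds]
          unfold pvAval
          simp [pvLoopA, hds]
        · intro p hp
          simp only [if_pos hds] at hp
          rcases List.mem_cons.mp hp with rfl | hp
          · right
            unfold pvAval; simp [pvLoopA, hds]
          · exact Or.inl hp
      · simp only [if_neg hds, pvFind?_eq_head?_filter]
        cases hfd : ((pvDests graph x).filter (fun d => ff.contains d)).head? with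
        | none =>
          refine ⟨(pvAval_term graph ff x hds (Or.inl hfd)).symm, fun p hp => ?_⟩
          rcases List.mem_cons.mp hp with h | hp
          · exact Or.inr (by rw [h])
          · exact Or.inl hp
        | some n =>
          by_cases hdn : pvDests graph n = []
          · simp only [if_pos hdn]
            refine ⟨(pvAval_term graph ff x hds (Or.inr ⟨n, hfd, hdn⟩)).symm, fun p hp => ?_⟩
            rcases List.mem_cons.mp hp with h | hp
            · exact Or.inr (by rw [h])
            · exact Or.inl hp
          · simp only [if_neg hdn]
            have htn : pvTerm graph ff fuel n = true := by
              simp only [pvTerm, if_neg hds, hfd] at ht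
              exact ht
            have hAx : pvAval graph ff x = pvAval graph ff n :=
              pvAval_step graph ff x n hds hfd hdn fuel ht hfuel
            obtain ⟨h1, h2⟩ := ih memo (x :: path) n hinv htn (by omega)
            refine ⟨by rw [h1, hAx], fun p hp => ?_⟩
            rcases h2 p hp with hmem | hval
            · rcases List.mem_cons.mp hmem with h | hmem
              · exact Or.inr (by rw [h])
              · exact Or.inl hmem
            · exact Or.inr (by rw [hval, hAx])

theorem pvInv_insert (graph : List (String × String × List String)) (ff : List String)
    (v : Int) :
    ∀ (ps : List String) (memo : PySem.Dict String Int), pvInv graph ff memo → (∀ p ∈ ps, pvAval graph ff p = v) →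
      pvInv graph ff (ps.foldl (fun m p => m.insert p v) memo) := by
  intro ps
  induction ps with
  | nil => intro memo hinv _; simpa using hinv
  | cons a ps ih =>
    intro memo hinv h
    simp only [List.foldl_cons]
    refine ih _ ?_ (fun p hp => h p (by simp [hp]))
    intro k w hk
    rw [PySem.Dict.get?_insert] at hk
    by_cases he : k = a
    · rw [if_pos he] at hk
      have hw : w = v := by cases hk; rfl
      rw [hw, he]
      exact (h a (by simp)).symm
    · rw [if_neg he] at hk
      exact hinv k w hk

-- the whole fold: B's results list equals A's, threading the memo invariant
theorem pvFold_eq (graph : List (String × String × List String)) (ff : List String) :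
    ∀ (l : List String) (memo : PySem.Dict String Int) (acc : List Int),
      pvInv graph ff memo →
      (∀ f ∈ l, pvTerm graph ff (ff.length + 1) f = true) →
      (l.foldl
        (fun (st : PySem.Dict String Int × List Int) f =>
          let r := pvWalkB graph ff (ff.length + 1) st.1 [] f
          (r.2.foldl (fun m p => m.insert p r.1) st.1, st.2 ++ [r.1]))
        (memo, acc)).2
      = l.foldl (fun results f => results ++ [pvAval graph ff f]) acc := by
  intro l
  induction l with
  | nil => intro memo acc _ _; rfl
  | cons f l ih =>
    intro memo acc hinv hterm
    simp only [List.foldl_cons]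
    obtain ⟨h1, h2⟩ := pvWalkB_correct graph ff (ff.length + 1) memo [] f hinv
      (hterm f (by simp)) (le_refl _)
    have hvals : ∀ p ∈ (pvWalkB graph ff (ff.length + 1) memo [] f).2,
        pvAval graph ff p = (pvWalkB graph ff (ff.length + 1) memo [] f).1 := by
      intro p hp
      rcases h2 p hp with hmem | hval
      · cases hmem
      · rw [hval, h1]
    rw [h1] at hvals
    rw [h1]
    exact ih _ _ (pvInv_insert graph ff _ _ memo hinv hvals) (fun g hg => hterm g (by simp [hg]))

-- ===== VERDICT (by name: the statement is the Claim_ definition above) =====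
theorem process_flip_flops_spec : Claim_equal_process_flip_flops := by
  intro graph ff _hdom hpre
  unfold Spec_process_flip_flops process_flip_flops process_flip_flops_alt
  have hempty : pvInv graph ff PySem.Dict.empty := by
    intro k v hk
    rw [PySem.Dict.get?_empty] at hk
    cases hk
  rw [pvFold_eq graph ff ff PySem.Dict.empty [] hempty hpre]
  rfl
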